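-- pv_equiv track=rewrite | github.com/Supergrammer/Algorithms | python/Algorithms_Python/Algorithms_Python/Test/우아한테크코스 3기 온라인 코딩테스트(웹프론트엔드과정)/프로그래밍7.py | solution
-- ===== SOURCE A (Python) =====
-- def solution(n, horizontal):
-- 	answer = [[-1] * n for _ in range(n)]
-- 	time = 0
--
-- 	arr = []
-- 	for i in range((n - 1) * 2 + 1):
-- 		tmp = []
-- 		for j in range(n - abs(n - i - 1)):
-- 			tmp.append(time)
-- 			if j != n - abs(n - i - 1) - 1:
-- 				time += 2
-- 		time += 1
--
-- 		if (not horizontal and i % 2 == 1) or (horizontal and i % 2 == 0):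
-- 			tmp.reverse()
--
-- 		if i < n - 1: tmp = tmp + [-1] * (n - len(tmp))
-- 		else: tmp = [-1] * (n - len(tmp)) + tmp
-- 		arr.append(tmp)
--
-- 	for i in range(n):
-- 		tmp = []
--
-- 		for j in range((n - 1) * 2 + 1):
-- 			if arr[j][i] != -1:
-- 				tmp.append(arr[j][i])
--
-- 		for j in range(n):
-- 			answer[i][j] = tmp[j]
--
-- 	return answer
-- ===== SOURCE B (Python) =====
-- def solution(n, horizontal):
--     def cell(r, c):
--         d = r + c
--         if d < n:
--             start = d * d
--             k = r
--         else:
--             m = 2 * n - 1 - d          # length of diagonal d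
--             start = 2 * n * n - m * m - m - d
--             k = r - (d - n + 1)
--         L = min(d + 1, 2 * n - 1 - d)
--         if (horizontal and d % 2 == 0) or (not horizontal and d % 2 == 1):
--             k = L - 1 - k
--         return start + 2 * k
--     return [[cell(r, c) for c in range(n)] for r in range(n)]
-- ===== Notes on version B (the rewrite author's own statement) =====
-- stated objective: simpler
-- what changed: B drops A's (2n-1)-row padded diagonal matrix and its column-extraction/transpose pass entirely and computes each cell (r,c) directly from a closed-form start-time formula for its anti-diagonal d=r+c plus the zigzag offset, building the answer with a single doubly-indexed comprehension.
import Mathlib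
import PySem

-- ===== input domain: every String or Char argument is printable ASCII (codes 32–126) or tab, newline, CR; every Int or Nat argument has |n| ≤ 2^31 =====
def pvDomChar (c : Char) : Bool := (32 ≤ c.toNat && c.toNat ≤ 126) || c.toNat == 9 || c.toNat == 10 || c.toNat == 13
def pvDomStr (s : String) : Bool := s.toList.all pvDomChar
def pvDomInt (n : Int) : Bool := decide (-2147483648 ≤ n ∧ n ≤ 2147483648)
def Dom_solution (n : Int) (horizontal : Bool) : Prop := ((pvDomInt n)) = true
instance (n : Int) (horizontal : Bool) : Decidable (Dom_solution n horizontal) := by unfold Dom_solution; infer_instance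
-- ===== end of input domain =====

-- B replaces A's (2n-1)×n padded diagonal matrix and its transpose/extraction pass
-- by a closed-form per-cell time formula; objective: simpler (no intermediate matrix).

-- ===== PORT A =====
def solution (n : Int) (horizontal : Bool) : List (List Int) :=
  let answer : List (List Int) :=
    (PySem.List.pyRange 0 n 1).map (fun _ => PySem.List.pyRepeat [(-1 : Int)] n)
  -- first loop: build arr, threading (arr, time)
  let st :=
    (PySem.List.pyRange 0 ((n - 1) * 2 + 1) 1).foldl
      (fun (st : List (List Int) × Int) i =>
        let inner :=
          (PySem.List.pyRange 0 (n - ((n - i - 1).natAbs : Int)) 1).foldl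
            (fun (p : List Int × Int) j =>
              let tmp := p.1 ++ [p.2]
              let time := if j ≠ n - ((n - i - 1).natAbs : Int) - 1 then p.2 + 2 else p.2
              (tmp, time))
            ([], st.2)
        let tmp := inner.1
        let time := inner.2 + 1
        let tmp := if ((!horizontal) && (PySem.Int.mod i 2 == 1)) ||
                      (horizontal && (PySem.Int.mod i 2 == 0)) then tmp.reverse else tmp
        let tmp := if i < n - 1 then tmp ++ PySem.List.pyRepeat [(-1 : Int)] (n - PySem.List.len tmp)
                   else PySem.List.pyRepeat [(-1 : Int)] (n - PySem.List.len tmp) ++ tmp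
        (st.1 ++ [tmp], time))
      ([], 0)
  let arr := st.1
  -- second loop: extract column i of arr into row i of answer
  (PySem.List.pyRange 0 n 1).foldl
    (fun answer i =>
      let tmp :=
        (PySem.List.pyRange 0 ((n - 1) * 2 + 1) 1).foldl
          (fun tmp j =>
            -- arr[j][i]: indices are always in range here, so the defaults are never read
            let v := PySem.List.pyGetD (PySem.List.pyGetD arr j []) i (-1 : Int)
            if v ≠ -1 then tmp ++ [v] else tmp)
          []
      -- for j in range(n): answer[i][j] = tmp[j]  (read row i, update it cell by cell, write it back)
      PySem.List.pySetD answer i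
        ((PySem.List.pyRange 0 n 1).foldl
          (fun row j => PySem.List.pySetD row j (PySem.List.pyGetD tmp j (-1 : Int)))
          (PySem.List.pyGetD answer i [])))
    answer

-- ===== PORT B =====
def pvCell (n : Int) (horizontal : Bool) (r c : Int) : Int :=
  let d := r + c
  let sk : Int × Int :=
    if d < n then (d * d, r)
    else
      let m := 2 * n - 1 - d
      (2 * n * n - m * m - m - d, r - (d - n + 1))
  let L := min (d + 1) (2 * n - 1 - d)
  let k := if (horizontal && (PySem.Int.mod d 2 == 0)) ||
              ((!horizontal) && (PySem.Int.mod d 2 == 1)) then L - 1 - sk.2 else sk.2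
  sk.1 + 2 * k

def solution_alt (n : Int) (horizontal : Bool) : List (List Int) :=
  (PySem.List.pyRange 0 n 1).map (fun r =>
    (PySem.List.pyRange 0 n 1).map (fun c => pvCell n horizontal r c))

-- ===== PRECONDITION & SPEC =====
def Spec_solution (n : Int) (horizontal : Bool) (out : List (List Int)) : Prop := out = solution_alt n horizontal
instance (n : Int) (horizontal : Bool) (out : List (List Int)) : Decidable (Spec_solution n horizontal out) := by unfold Spec_solution; infer_instance

-- ===== CLAIM (what is proved, stated in full; the proofs are below) =====
def Claim_equal_solution : Prop := ∀ (n : Int) (horizontal : Bool), Dom_solution n horizontal → Spec_solution n horizontal (solution n horizontal)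

-- ===== LEMMAS AND PROOFS =====

-- helper defs
def pvLen (n d : Int) : Int := n - ((n - d - 1).natAbs : Int)

def pvT (n : Int) : Nat → Int
  | 0 => 0
  | d+1 => pvT n d + 2 * (pvLen n d - 1) + 1

def pvRev (h : Bool) (i : Int) : Bool :=
  ((!h) && (PySem.Int.mod i 2 == 1)) || (h && (PySem.Int.mod i 2 == 0))

def pvVals (t : Int) (m : Nat) : List Int := (List.range m).map (fun k : Nat => t + 2 * (k : Int))

def pvRowA (n : Int) (h : Bool) (i t : Int) : List Int :=
  let tmp := pvVals t (pvLen n i).toNat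
  let tmp := if pvRev h i then tmp.reverse else tmp
  if i < n - 1 then tmp ++ PySem.List.pyRepeat [(-1 : Int)] (n - PySem.List.len tmp)
  else PySem.List.pyRepeat [(-1 : Int)] (n - PySem.List.len tmp) ++ tmp

theorem pvVals_succ_left (t : Int) (m : Nat) : pvVals t (m+1) = t :: pvVals (t+2) m := by
  unfold pvVals
  rw [List.range_succ_eq_map, List.map_cons, List.map_map]
  refine congrArg₂ _ (by simp) ?_
  apply List.map_congr_left; intro k _; simp only [Function.comp_apply]; push_cast; ring

-- L1: unconditional inner loop
theorem pv_inner_u (l : List Int) (ts : List Int) (t0 : Int) :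
    l.foldl (fun (p : List Int × Int) _ => (p.1 ++ [p.2], p.2 + 2)) (ts, t0)
      = (ts ++ pvVals t0 l.length, t0 + 2 * l.length) := by
  induction l generalizing ts t0 with
  | nil => simp [pvVals]
  | cons x xs ih =>
    simp only [List.foldl_cons, ih, List.length_cons, pvVals_succ_left, Prod.mk.injEq]
    refine ⟨by simp, by push_cast; ring⟩

-- L2: inner loop with the last-step condition
theorem pv_inner (L : Int) (hL : 1 ≤ L) (t0 : Int) :
    (PySem.List.pyRange 0 L 1).foldl
      (fun (p : List Int × Int) j =>
        (p.1 ++ [p.2], if j ≠ L - 1 then p.2 + 2 else p.2)) ([], t0)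
      = (pvVals t0 L.toNat, t0 + 2 * (L - 1)) := by
  have hsplit : PySem.List.pyRange 0 L 1 = PySem.List.pyRange 0 (L-1) 1 ++ [L-1] := by
    have := PySem.List.pyRange_one_succ_right (a := 0) (b := L - 1) (by omega)
    simpa using this
  rw [hsplit, List.foldl_append]
  have hcong : (PySem.List.pyRange 0 (L-1) 1).foldl
      (fun (p : List Int × Int) j =>
        (p.1 ++ [p.2], if j ≠ L - 1 then p.2 + 2 else p.2)) ([], t0)
      = (PySem.List.pyRange 0 (L-1) 1).foldl
        (fun (p : List Int × Int) _ => (p.1 ++ [p.2], p.2 + 2)) ([], t0) := by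
    apply PySem.List.foldl_congr_mem
    intro acc x hx
    rw [PySem.List.mem_pyRange_one] at hx
    simp [show x ≠ L - 1 by omega]
  rw [hcong, pv_inner_u]
  have hlen : (PySem.List.pyRange 0 (L-1) 1).length = (L-1).toNat := by
    simpa using PySem.List.length_pyRange_one (a := 0) (b := L - 1)
  have h1 : ((L-1).toNat : Int) = L - 1 := by omega
  rw [hlen, h1]
  simp only [List.foldl_cons, List.foldl_nil, ne_eq, not_true_eq_false, if_neg, ite_false,
    not_false_eq_true, Prod.mk.injEq]
  refine ⟨?_, trivial⟩
  have h2 : L.toNat = (L-1).toNat + 1 := by omega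
  rw [h2]
  simp [pvVals, List.range_succ, h1]
  omega

-- pvT facts
theorem pvLen_pos (n : Int) (m : Nat) (hn : 1 ≤ n) (hm : (m:Int) ≤ 2*n-2) :
    1 ≤ pvLen n m := by unfold pvLen; omega

theorem pvT_nonneg (n : Int) (hn : 1 ≤ n) : ∀ m : Nat, (m:Int) ≤ 2*n-1 → 0 ≤ pvT n m := by
  intro m
  induction m with
  | zero => intro _; simp [pvT]
  | succ k ih =>
    intro hk
    have h1 : (k:Int) ≤ 2*n-1 := by push_cast at hk ⊢; omega
    have h2 := pvLen_pos n k hn (by push_cast at hk ⊢; omega)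
    have := ih h1
    simp only [pvT]; omega

theorem pvT_closed (n : Int) (hn : 1 ≤ n) : ∀ m : Nat, (m:Int) ≤ 2*n-1 →
    pvT n m = if (m:Int) < n then (m:Int) * (m:Int)
              else 2*n*n - (2*n-1-(m:Int))*(2*n-1-(m:Int)) - (2*n-1-(m:Int)) - (m:Int) := by
  intro m
  induction m with
  | zero => intro _; simp [pvT]; intro h; omega
  | succ k ih =>
    intro hk
    have hk' : (k:Int) ≤ 2*n-1 := by push_cast at hk ⊢; omega
    have hL : ((n - (k:Int) - 1).natAbs : Int) = if (k:Int) < n then n - k - 1 else (k:Int) + 1 - n := by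
      split <;> omega
    rw [pvT, ih hk', pvLen, hL]
    push_cast
    by_cases h2 : (k:Int) + 1 < n
    · have h1 : (k:Int) < n := by omega
      rw [if_pos h1, if_pos h1, if_pos h2]; ring
    · by_cases h1 : (k:Int) < n
      · have hn2 : n = (k:Int) + 1 := by omega
        rw [if_pos h1, if_pos h1, if_neg h2, hn2]; ring
      · rw [if_neg h1, if_neg h1, if_neg h2]; ring

-- L3: characterization of the first loop (arr and final time)
theorem pv_arr (n : Int) (hb : Bool) (hn : 1 ≤ n) : ∀ m : Nat, (m:Int) ≤ 2*n-1 →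
    (PySem.List.pyRange 0 (m:Int) 1).foldl
      (fun (st : List (List Int) × Int) i =>
        let inner :=
          (PySem.List.pyRange 0 (n - ((n - i - 1).natAbs : Int)) 1).foldl
            (fun (p : List Int × Int) j =>
              let tmp := p.1 ++ [p.2]
              let time := if j ≠ n - ((n - i - 1).natAbs : Int) - 1 then p.2 + 2 else p.2
              (tmp, time))
            ([], st.2)
        let tmp := inner.1
        let time := inner.2 + 1
        let tmp := if ((!hb) && (PySem.Int.mod i 2 == 1)) ||
                      (hb && (PySem.Int.mod i 2 == 0)) then tmp.reverse else tmp
        let tmp := if i < n - 1 then tmp ++ PySem.List.pyRepeat [(-1 : Int)] (n - PySem.List.len tmp)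
                   else PySem.List.pyRepeat [(-1 : Int)] (n - PySem.List.len tmp) ++ tmp
        (st.1 ++ [tmp], time))
      ([], 0)
    = ((List.range m).map (fun d : Nat => pvRowA n hb (d:Int) (pvT n d)), pvT n m) := by
  intro m
  induction m with
  | zero => intro _; simp [pvT]
  | succ k ih =>
    intro hk
    have hk' : ((k:Nat):Int) ≤ 2*n-1 := by push_cast at hk ⊢; omega
    have hcast : ((k+1 : Nat) : Int) = (k:Int) + 1 := by push_cast; ring
    rw [hcast, PySem.List.pyRange_one_succ_right (by positivity), List.foldl_append, ih hk']
    simp only [List.foldl_cons, List.foldl_nil]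
    have hL : 1 ≤ n - ((n - (k:Int) - 1).natAbs : Int) := pvLen_pos n k hn (by push_cast at hk ⊢; omega)
    have hinner := pv_inner (n - ((n - (k:Int) - 1).natAbs : Int)) hL (pvT n k)
    rw [hinner, List.range_succ, List.map_append]
    simp only [List.map_cons, List.map_nil, Prod.mk.injEq]
    constructor
    · simp [pvRowA, pvRev, pvLen]
    · simp [pvT, pvLen]

def pvEntry (n : Int) (h : Bool) (d t i : Int) : Int :=
  t + 2 * (if pvRev h d then (pvLen n d - 1) - (i - max 0 (d - n + 1)) else i - max 0 (d - n + 1))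

theorem pvVals_length (t : Int) (m : Nat) : (pvVals t m).length = m := by simp [pvVals]

theorem pvVals_getD (t : Int) (m k : Nat) (hk : k < m) :
    (pvVals t m).getD k (-1) = t + 2 * k := by
  rw [List.getD_eq_getElem _ _ (by simpa [pvVals_length] using hk)]
  simp [pvVals]

theorem pv_row_get (n : Int) (h : Bool) (hn : 1 ≤ n) (d : Nat) (hd : (d:Int) ≤ 2*n-2)
    (i : Nat) (hi : (i:Int) < n) (t : Int) (ht : 0 ≤ t) :
    PySem.List.pyGetD (pvRowA n h d t) (i:Int) (-1)
      = if ((i:Int) ≤ (d:Int) ∧ (d:Int) ≤ (i:Int) + n - 1) then pvEntry n h (d:Int) t (i:Int) else -1 := by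
  rw [PySem.List.pyGetD_natCast]
  unfold pvRowA pvEntry
  set L : Int := pvLen n (d:Int) with hLdef
  have hL1 : 1 ≤ L := pvLen_pos n d hn hd
  set body : List Int := if pvRev h (d:Int) then (pvVals t L.toNat).reverse else pvVals t L.toNat with hbody
  have hblen : body.length = L.toNat := by
    rw [hbody]; split <;> simp [pvVals_length]
  have hbget : ∀ k : Nat, k < L.toNat → body.getD k (-1)
      = t + 2 * (if pvRev h (d:Int) then (L - 1) - k else (k:Int)) := by
    intro k hk
    rw [hbody]
    split
    · rw [List.getD_eq_getElem _ _ (by simpa [pvVals_length] using hk),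
        List.getElem_reverse]
      simp only [pvVals, List.getElem_map, List.getElem_range, List.length_map, List.length_range]
      omega
    · rw [pvVals_getD t L.toNat k hk]
  have hrep : ∀ (m : Int) (k : Nat), (PySem.List.pyRepeat [(-1:Int)] m).getD k (-1) = -1 := by
    intro m k
    rw [PySem.List.pyRepeat_singleton]
    rcases Nat.lt_or_ge k m.toNat with hlt | hge
    · rw [List.getD_eq_getElem _ _ (by simpa using hlt)]; simp
    · rw [List.getD_eq_default _ _ (by simpa using hge)]
  by_cases hdn : (d:Int) < n - 1
  · -- left-aligned: body ++ pad
    rw [if_pos hdn]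
    have hLd : L = (d:Int) + 1 := by rw [hLdef]; unfold pvLen; omega
    by_cases hid : (i:Int) ≤ (d:Int)
    · have hilt : i < body.length := by rw [hblen]; omega
      rw [List.getD_append _ _ _ _ hilt, if_pos ⟨hid, by omega⟩]
      rw [hbget i (by omega)]
      have hmax : max 0 ((d:Int) - n + 1) = 0 := by omega
      rw [hmax]
      split <;> omega
    · have hile : body.length ≤ i := by rw [hblen]; omega
      rw [List.getD_append_right _ _ _ _ hile, hrep, if_neg (by omega)]
  · -- right-aligned: pad ++ body
    rw [if_neg hdn]
    have hLd : L = 2*n - 1 - (d:Int) := by rw [hLdef]; unfold pvLen; omega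
    have hplen : (PySem.List.pyRepeat [(-1:Int)] (n - PySem.List.len body)).length = ((d:Int) - n + 1).toNat := by
      rw [PySem.List.pyRepeat_singleton]
      simp [PySem.List.len_eq, hblen]
      omega
    by_cases hip : (i:Int) < (d:Int) - n + 1
    · rw [List.getD_append _ _ _ _ (by rw [hplen]; omega), hrep, if_neg (by omega)]
    · rw [List.getD_append_right _ _ _ _ (by rw [hplen]; omega)]
      have hk : i - ((d:Int) - n + 1).toNat < L.toNat := by omega
      rw [hplen, hbget _ hk,
        if_pos (show ((i:Int) ≤ (d:Int) ∧ ((d:Int) ≤ (i:Int) + n - 1)) from ⟨by omega, by omega⟩)]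
      have hmax : max 0 ((d:Int) - n + 1) = (d:Int) - n + 1 := by omega
      rw [hmax]
      split <;> push_cast <;> omega

theorem pvEntry_nonneg (n : Int) (h : Bool) (d t i : Int) (hn : 1 ≤ n) (ht : 0 ≤ t)
    (hd : d ≤ 2*n-2) (hi1 : i ≤ d) (hi2 : d ≤ i + n - 1) (hi0 : 0 ≤ i) (hin : i < n) :
    0 ≤ pvEntry n h d t i := by
  unfold pvEntry pvLen
  split <;> omega

-- the second loop's inner fold: extracting column i of arr
theorem pv_col (n : Int) (hb : Bool) (hn : 1 ≤ n) (i : Nat) (hi : (i:Int) < n) :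
    (PySem.List.pyRange 0 ((n - 1) * 2 + 1) 1).foldl
      (fun tmp j =>
        let v := PySem.List.pyGetD
          (PySem.List.pyGetD ((List.range (2*n-1).toNat).map
            (fun d : Nat => pvRowA n hb (d:Int) (pvT n d))) j []) (i:Int) (-1 : Int)
        if v ≠ -1 then tmp ++ [v] else tmp) []
    = (List.range n.toNat).map
        (fun c : Nat => pvEntry n hb ((i:Int)+(c:Int)) (pvT n (i+c)) (i:Int)) := by
  have h2n : (n - 1) * 2 + 1 = 2*n-1 := by ring
  rw [h2n]
  have hgetrow : ∀ j : Int, 0 ≤ j → j < 2*n-1 →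
      PySem.List.pyGetD ((List.range (2*n-1).toNat).map
        (fun d : Nat => pvRowA n hb (d:Int) (pvT n d))) j [] = pvRowA n hb j (pvT n j.toNat) := by
    intro j hj0 hj1
    rw [PySem.List.pyGetD_of_nonneg _ _ hj0,
      PySem.List.getD_map_range _ _ _ _ (by omega)]
    congr 1
    omega
  have hv : ∀ j : Int, 0 ≤ j → j < 2*n-1 →
      PySem.List.pyGetD (PySem.List.pyGetD ((List.range (2*n-1).toNat).map
        (fun d : Nat => pvRowA n hb (d:Int) (pvT n d))) j []) (i:Int) (-1 : Int)
      = if ((i:Int) ≤ j ∧ j ≤ (i:Int) + n - 1) then pvEntry n hb j (pvT n j.toNat) (i:Int) else -1 := by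
    intro j hj0 hj1
    rw [hgetrow j hj0 hj1]
    have := pv_row_get n hb hn j.toNat (by omega) i hi (pvT n j.toNat)
      (pvT_nonneg n hn j.toNat (by omega))
    rw [show ((j.toNat : Nat) : Int) = j by omega] at this
    rw [this]
  have hsplit : PySem.List.pyRange 0 (2*n-1) 1
      = PySem.List.pyRange 0 (i:Int) 1 ++ (PySem.List.pyRange (i:Int) ((i:Int)+n) 1
        ++ PySem.List.pyRange ((i:Int)+n) (2*n-1) 1) := by
    rw [← PySem.List.pyRange_one_append (i:Int) ((i:Int)+n) (2*n-1) (by omega) (by omega),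
      ← PySem.List.pyRange_one_append 0 (i:Int) (2*n-1) (by omega) (by omega)]
  rw [hsplit, List.foldl_append, List.foldl_append]
  have hseg1 : (PySem.List.pyRange 0 (i:Int) 1).foldl
      (fun tmp j =>
        let v := PySem.List.pyGetD
          (PySem.List.pyGetD ((List.range (2*n-1).toNat).map
            (fun d : Nat => pvRowA n hb (d:Int) (pvT n d))) j []) (i:Int) (-1 : Int)
        if v ≠ -1 then tmp ++ [v] else tmp) ([] : List Int) = [] := by
    rw [PySem.List.foldl_congr_mem _ _ (fun acc _ => acc) _
      (by intro acc x hx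
          rw [PySem.List.mem_pyRange_one] at hx
          simp only [hv x hx.1 (by omega), if_neg (by omega : ¬((i:Int) ≤ x ∧ x ≤ (i:Int) + n - 1))]
          simp),
      PySem.List.foldl_ignore]
  rw [hseg1]
  have hseg2 : (PySem.List.pyRange (i:Int) ((i:Int)+n) 1).foldl
      (fun tmp j =>
        let v := PySem.List.pyGetD
          (PySem.List.pyGetD ((List.range (2*n-1).toNat).map
            (fun d : Nat => pvRowA n hb (d:Int) (pvT n d))) j []) (i:Int) (-1 : Int)
        if v ≠ -1 then tmp ++ [v] else tmp) ([] : List Int)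
      = (PySem.List.pyRange (i:Int) ((i:Int)+n) 1).map (fun j => pvEntry n hb j (pvT n j.toNat) (i:Int)) := by
    rw [PySem.List.foldl_congr_mem _ _ (fun acc j => acc ++ [pvEntry n hb j (pvT n j.toNat) (i:Int)]) _
      (by intro acc x hx
          rw [PySem.List.mem_pyRange_one] at hx
          have hx1 : (i:Int) ≤ x ∧ x ≤ (i:Int) + n - 1 := ⟨hx.1, by omega⟩
          have hnn : 0 ≤ pvEntry n hb x (pvT n x.toNat) (i:Int) :=
            pvEntry_nonneg n hb x _ (i:Int) hn (pvT_nonneg n hn x.toNat (by omega))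
              (by omega) hx1.1 hx1.2 (by omega) hi
          simp only [hv x (by omega) (by omega), if_pos hx1]
          rw [if_pos (by omega : pvEntry n hb x (pvT n x.toNat) (i:Int) ≠ -1)]),
      PySem.List.foldl_append_singleton_eq_map]
    simp
  rw [hseg2]
  have hseg3 : ∀ acc : List Int, (PySem.List.pyRange ((i:Int)+n) (2*n-1) 1).foldl
      (fun tmp j =>
        let v := PySem.List.pyGetD
          (PySem.List.pyGetD ((List.range (2*n-1).toNat).map
            (fun d : Nat => pvRowA n hb (d:Int) (pvT n d))) j []) (i:Int) (-1 : Int)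
        if v ≠ -1 then tmp ++ [v] else tmp) acc = acc := by
    intro acc
    rw [PySem.List.foldl_congr_mem _ _ (fun acc _ => acc) _
      (by intro acc x hx
          rw [PySem.List.mem_pyRange_one] at hx
          simp only [hv x (by omega) (by omega), if_neg (by omega : ¬((i:Int) ≤ x ∧ x ≤ (i:Int) + n - 1))]
          simp),
      PySem.List.foldl_ignore]
  rw [hseg3]
  rw [PySem.List.pyRange_one]
  rw [List.map_map]
  have hlen : ((i:Int) + n - (i:Int)).toNat = n.toNat := by omega
  rw [hlen]
  apply List.map_congr_left
  intro c hc
  rw [List.mem_range] at hc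
  simp only [Function.comp_apply]
  rw [show ((i:Int)+(c:Int)).toNat = i + c by omega]

theorem pv_set_mid {α : Type} (pre : List α) (k : Nat) (hk : pre.length = k) (x v : α) (xs : List α) :
    (pre ++ x :: xs).set k v = pre ++ v :: xs := by
  subst hk
  rw [List.set_append_right _ _ (le_refl _)]
  simp

-- filling a row cell by cell yields tmp
theorem pv_fill (tmp : List Int) : ∀ (m : Nat), m ≤ tmp.length → ∀ (row : List Int), row.length = tmp.length →
    (PySem.List.pyRange 0 (m:Int) 1).foldl
      (fun r j => PySem.List.pySetD r j (PySem.List.pyGetD tmp j (-1))) row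
    = tmp.take m ++ row.drop m := by
  intro m
  induction m with
  | zero => intro _ row _; simp [PySem.List.pyRange_zero_nat]
  | succ k ih =>
    intro hk row hrow
    have hcast : ((k+1 : Nat) : Int) = (k:Int) + 1 := by push_cast; ring
    rw [hcast, PySem.List.pyRange_one_succ_right (by positivity), List.foldl_append,
      ih (by omega) row hrow]
    simp only [List.foldl_cons, List.foldl_nil]
    rw [PySem.List.pySetD_natCast, PySem.List.pyGetD_natCast]
    have hkt : k < tmp.length := by omega
    have hkr : k < row.length := by omega
    rw [List.getD_eq_getElem _ _ hkt,
      List.drop_eq_getElem_cons hkr,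
      pv_set_mid (tmp.take k) k (by simp; omega) _ _ _]
    rw [List.take_succ_eq_append_getElem hkt, List.append_assoc, List.singleton_append]

theorem pv_outer (n : Int) (hn : 1 ≤ n) (tmpf : Int → List Int)
    (hlen : ∀ i : Int, (tmpf i).length = n.toNat)
    (A0 : List (List Int)) (hA0 : A0.length = n.toNat)
    (hrows : ∀ (k : Nat) (hk : k < A0.length), A0[k].length = n.toNat) :
    ∀ m : Nat, m ≤ n.toNat →
    (PySem.List.pyRange 0 (m:Int) 1).foldl
      (fun answer i => PySem.List.pySetD answer i
        ((PySem.List.pyRange 0 n 1).foldl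
          (fun r j => PySem.List.pySetD r j (PySem.List.pyGetD (tmpf i) j (-1)))
          (PySem.List.pyGetD answer i []))) A0
    = (List.range m).map (fun k : Nat => tmpf (k:Int)) ++ A0.drop m := by
  intro m
  induction m with
  | zero => intro _; simp [PySem.List.pyRange_zero_nat]
  | succ k ih =>
    intro hk
    have hcast : ((k+1 : Nat) : Int) = (k:Int) + 1 := by push_cast; ring
    rw [hcast, PySem.List.pyRange_one_succ_right (by positivity), List.foldl_append,
      ih (by omega)]
    simp only [List.foldl_cons, List.foldl_nil]
    have hkA : k < A0.length := by omega
    have hdrop : A0.drop k = A0[k] :: A0.drop (k+1) := List.drop_eq_getElem_cons hkA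
    have hprelen : ((List.range k).map (fun k : Nat => tmpf (k:Int))).length = k := by simp
    have hget : PySem.List.pyGetD ((List.range k).map (fun k : Nat => tmpf (k:Int)) ++ A0.drop k) (k:Int) []
        = A0[k] := by
      rw [PySem.List.pyGetD_natCast, hdrop,
        show ((List.range k).map (fun k : Nat => tmpf (k:Int)) ++ A0[k] :: A0.drop (k+1)).getD k []
          = A0[k] from by
          rw [List.getD_eq_getElem _ _ (by simp [hprelen]; omega)]
          rw [List.getElem_append_right (by omega)]
          simp [hprelen]]
    rw [hget]
    have hfillrange : PySem.List.pyRange 0 n 1 = PySem.List.pyRange 0 ((n.toNat : Nat) : Int) 1 := by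
      rw [show ((n.toNat : Nat) : Int) = n by omega]
    rw [hfillrange, pv_fill (tmpf (k:Int)) n.toNat (by rw [hlen]) A0[k]
        (by rw [hrows k hkA, hlen]),
      List.take_of_length_le (le_of_eq (hlen _)),
      List.drop_of_length_le (le_of_eq (hrows k hkA)), List.append_nil]
    rw [PySem.List.pySetD_natCast, hdrop,
      pv_set_mid _ k hprelen _ _ _,
      List.range_succ, List.map_append]
    simp

theorem pv_cell_eq (n : Int) (h : Bool) (hn : 1 ≤ n) (r c : Nat)
    (hr : (r:Int) < n) (hc : (c:Int) < n) :
    pvEntry n h ((r:Int)+(c:Int)) (pvT n (r+c)) (r:Int) = pvCell n h (r:Int) (c:Int) := by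
  have hd : ((r+c : Nat) : Int) = (r:Int)+(c:Int) := by push_cast; ring
  have hT := pvT_closed n hn (r+c) (by push_cast; omega)
  rw [hd] at hT
  simp only [pvEntry, pvCell, pvRev, pvLen]
  rw [hT]
  have hrev : ((!h) && (PySem.Int.mod ((r:Int)+(c:Int)) 2 == 1) || h && (PySem.Int.mod ((r:Int)+(c:Int)) 2 == 0))
      = (h && (PySem.Int.mod ((r:Int)+(c:Int)) 2 == 0) || (!h) && (PySem.Int.mod ((r:Int)+(c:Int)) 2 == 1)) :=
    Bool.or_comm _ _
  rw [hrev]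
  by_cases hdn : (r:Int)+(c:Int) < n
  all_goals congr 1
  all_goals split <;> omega


theorem pv_main (n : Int) (h : Bool) : solution n h = solution_alt n h := by
  by_cases hn : 1 ≤ n
  case neg =>
    have hle : n ≤ 0 := by omega
    simp [solution, solution_alt, PySem.List.pyRange_one_eq_nil hle]
  case pos =>
    have harr2 :
        (PySem.List.pyRange 0 ((n - 1) * 2 + 1) 1).foldl
          (fun (st : List (List Int) × Int) i =>
            let inner :=
              (PySem.List.pyRange 0 (n - ((n - i - 1).natAbs : Int)) 1).foldl
                (fun (p : List Int × Int) j =>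
                  let tmp := p.1 ++ [p.2]
                  let time := if j ≠ n - ((n - i - 1).natAbs : Int) - 1 then p.2 + 2 else p.2
                  (tmp, time))
                ([], st.2)
            let tmp := inner.1
            let time := inner.2 + 1
            let tmp := if ((!h) && (PySem.Int.mod i 2 == 1)) ||
                          (h && (PySem.Int.mod i 2 == 0)) then tmp.reverse else tmp
            let tmp := if i < n - 1 then tmp ++ PySem.List.pyRepeat [(-1 : Int)] (n - PySem.List.len tmp)
                       else PySem.List.pyRepeat [(-1 : Int)] (n - PySem.List.len tmp) ++ tmp
            (st.1 ++ [tmp], time))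
          ([], 0)
        = ((List.range (2*n-1).toNat).map (fun d : Nat => pvRowA n h (d:Int) (pvT n d)),
            pvT n (2*n-1).toNat) := by
      rw [show (n - 1) * 2 + 1 = (((2*n-1).toNat : Nat) : Int) by omega]
      exact pv_arr n h hn (2*n-1).toNat (by omega)
    simp only [solution]
    rw [harr2]
    simp only
    -- replace the column-extraction fold by its map form, inside the outer fold
    rw [PySem.List.foldl_congr_mem _ _
      (fun answer i => PySem.List.pySetD answer i
        ((PySem.List.pyRange 0 n 1).foldl
          (fun r j => PySem.List.pySetD r j (PySem.List.pyGetD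
            ((List.range n.toNat).map
              (fun c : Nat => pvEntry n h (i+(c:Int)) (pvT n (i.toNat+c)) i)) j (-1)))
          (PySem.List.pyGetD answer i []))) _
      (by
        intro answer x hx
        rw [PySem.List.mem_pyRange_one] at hx
        have hcol := pv_col n h hn x.toNat (by omega)
        rw [show ((x.toNat : Nat) : Int) = x by omega] at hcol
        rw [hcol])]
    have houter :
        (PySem.List.pyRange 0 n 1).foldl
          (fun answer i => PySem.List.pySetD answer i
            ((PySem.List.pyRange 0 n 1).foldl
              (fun r j => PySem.List.pySetD r j (PySem.List.pyGetD
                ((List.range n.toNat).map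
                  (fun c : Nat => pvEntry n h (i+(c:Int)) (pvT n (i.toNat+c)) i)) j (-1)))
              (PySem.List.pyGetD answer i [])))
          ((PySem.List.pyRange 0 n 1).map (fun _ => PySem.List.pyRepeat [(-1 : Int)] n))
        = (List.range n.toNat).map (fun k : Nat =>
            (List.range n.toNat).map
              (fun c : Nat => pvEntry n h ((k:Int)+(c:Int)) (pvT n ((k:Int).toNat+c)) (k:Int)))
          ++ ((PySem.List.pyRange 0 n 1).map
              (fun _ => PySem.List.pyRepeat [(-1 : Int)] n)).drop n.toNat := by
      rw [show (n : Int) = ((n.toNat : Nat) : Int) from by omega]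
      exact pv_outer _ (by omega)
        (fun i => (List.range ((n.toNat:Int)).toNat).map
          (fun c : Nat => pvEntry ((n.toNat:Nat):Int) h (i+(c:Int)) (pvT ((n.toNat:Nat):Int) (i.toNat+c)) i))
        (by intro i; simp)
        _ (by simp [PySem.List.length_pyRange_one])
        (by intro k hk
            simp [PySem.List.pyRepeat_singleton])
        _ (le_refl _)
    rw [houter]
    rw [List.drop_of_length_le (by simp [PySem.List.length_pyRange_one]), List.append_nil]
    simp only [solution_alt, PySem.List.pyRange_one, List.map_map, Int.sub_zero, Int.toNat_natCast]
    apply List.map_congr_left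
    intro r hr
    rw [List.mem_range] at hr
    simp only [Function.comp_apply, zero_add, Int.toNat_natCast]
    apply List.map_congr_left
    intro c hc
    rw [List.mem_range] at hc
    exact pv_cell_eq n h hn r c (by omega) (by omega)

-- ===== VERDICT (by name: the statement is the Claim_ definition above) =====
theorem solution_spec : Claim_equal_solution := by
  intro n horizontal _
  exact pv_main n horizontal
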